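-- pv_equiv track=rewrite | github.com/OpenPecha/ai-text-outline-benchmark | benchmark/metrics.py | _breakpoints_to_bins
-- ===== SOURCE A (Python) =====
-- def _breakpoints_to_bins(breakpoints: list[int], text_length: int, bin_size: int) -> list[int]:
--     """Convert character-index breakpoints to a binary boundary array over bins.
--
--     Returns a list of 0s and 1s, where 1 indicates a segment boundary in that bin.
--     """
--     num_bins = max(1, text_length // bin_size)
--     bins = [0] * num_bins
--     for bp in breakpoints:
--         bin_idx = bp // bin_size
--         if 0 <= bin_idx < num_bins:
--             bins[bin_idx] = 1
--     return bins
-- ===== SOURCE B (Python) =====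
-- def _breakpoints_to_bins(breakpoints: list[int], text_length: int, bin_size: int) -> list[int]:
--     """Binary bin-boundary array built as runs from the sorted hit indices.
--
--     Sort-then-scan: collect the distinct in-range bin indices, sort them, and
--     emit the output as alternating runs of zeros and single ones, finishing
--     with a trailing zero run -- no preallocated array and no per-bin test.
--     """
--     num_bins = max(1, text_length // bin_size)
--     idxs = sorted({bp // bin_size for bp in breakpoints
--                    if 0 <= bp // bin_size < num_bins})
--     out = []
--     prev = 0
--     for idx in idxs:
--         out.extend([0] * (idx - prev))
--         out.append(1)
--         prev = idx + 1
--     out.extend([0] * (num_bins - prev))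
--     return out
-- ===== Notes on version B (the rewrite author's own statement) =====
-- stated objective: alternative
-- what changed: B is a sort-then-scan run builder: it collects the distinct in-range bin indices, sorts them, and emits the output as alternating zero-runs and single ones with a trailing zero run, instead of A's preallocated zero array with scatter writes while scanning breakpoints.
import Mathlib
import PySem

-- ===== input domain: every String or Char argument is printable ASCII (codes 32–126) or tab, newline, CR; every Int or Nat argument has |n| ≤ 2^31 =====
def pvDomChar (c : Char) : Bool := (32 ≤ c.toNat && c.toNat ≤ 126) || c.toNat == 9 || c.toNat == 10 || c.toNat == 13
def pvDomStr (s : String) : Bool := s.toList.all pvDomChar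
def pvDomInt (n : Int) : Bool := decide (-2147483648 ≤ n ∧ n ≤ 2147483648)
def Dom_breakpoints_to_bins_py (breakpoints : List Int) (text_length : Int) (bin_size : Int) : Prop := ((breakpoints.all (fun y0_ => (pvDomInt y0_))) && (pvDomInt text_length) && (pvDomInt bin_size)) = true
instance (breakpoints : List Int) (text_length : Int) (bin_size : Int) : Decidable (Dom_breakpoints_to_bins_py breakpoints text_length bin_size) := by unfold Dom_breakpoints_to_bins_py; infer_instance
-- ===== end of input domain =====

-- B builds the output as runs from the sorted distinct in-range bin indices (alternative: sort-then-scan run construction instead of scatter writes into a preallocated array).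


-- ===== PORT A =====
def breakpoints_to_bins_py (breakpoints : List Int) (text_length : Int) (bin_size : Int) : List Int :=
  let num_bins : Int := max 1 (PySem.Int.floordiv text_length bin_size)
  let bins : List Int := List.replicate num_bins.toNat 0
  breakpoints.foldl (fun bins bp =>
    let bin_idx := PySem.Int.floordiv bp bin_size
    if 0 ≤ bin_idx ∧ bin_idx < num_bins then PySem.List.pySetD bins bin_idx 1 else bins) bins

-- ===== PORT B =====
-- B's loop body, named (out-so-far, prev) → next (out, prev).
def stepB (s : List Int × Int) (idx : Int) : List Int × Int :=
  (s.1 ++ List.replicate (idx - s.2).toNat 0 ++ [1], idx + 1)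

def breakpoints_to_bins_py_alt (breakpoints : List Int) (text_length : Int) (bin_size : Int) : List Int :=
  let num_bins : Int := max 1 (PySem.Int.floordiv text_length bin_size)
  let idxs : List Int := PySem.List.sorted (PySem.Set.ofList (breakpoints.filterMap (fun bp =>
      let q := PySem.Int.floordiv bp bin_size
      if 0 ≤ q ∧ q < num_bins then some q else none))) (fun x => x) false
  let s := idxs.foldl stepB ([], 0)
  s.1 ++ List.replicate (num_bins - s.2).toNat 0

-- ===== PRECONDITION & SPEC =====
-- Pre_ excludes exactly bin_size = 0, where Python's '//' raises ZeroDivisionError (in B too).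
def Pre_breakpoints_to_bins_py (breakpoints : List Int) (text_length : Int) (bin_size : Int) : Prop := bin_size ≠ 0
instance (breakpoints : List Int) (text_length : Int) (bin_size : Int) : Decidable (Pre_breakpoints_to_bins_py breakpoints text_length bin_size) := by unfold Pre_breakpoints_to_bins_py; infer_instance
def pvWitness_breakpoints_to_bins_py : List Int × Int × Int := ([3, 12, -4, 7], 20, 5)

def Spec_breakpoints_to_bins_py (breakpoints : List Int) (text_length : Int) (bin_size : Int) (out : List Int) : Prop := out = breakpoints_to_bins_py_alt breakpoints text_length bin_size
instance (breakpoints : List Int) (text_length : Int) (bin_size : Int) (out : List Int) : Decidable (Spec_breakpoints_to_bins_py breakpoints text_length bin_size out) := by unfold Spec_breakpoints_to_bins_py; infer_instance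

-- ===== CLAIM (what is proved, stated in full; the proofs are below) =====
def Claim_equal_breakpoints_to_bins_py : Prop := ∀ (breakpoints : List Int) (text_length : Int) (bin_size : Int), Dom_breakpoints_to_bins_py breakpoints text_length bin_size → Pre_breakpoints_to_bins_py breakpoints text_length bin_size → Spec_breakpoints_to_bins_py breakpoints text_length bin_size (breakpoints_to_bins_py breakpoints text_length bin_size)

-- ===== LEMMAS AND PROOFS =====

-- A's loop body, named for the proofs (definitionally equal to the lambda in the port).
def stepA (s n : Int) (bins : List Int) (bp : Int) : List Int :=
  if 0 ≤ PySem.Int.floordiv bp s ∧ PySem.Int.floordiv bp s < n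
  then PySem.List.pySetD bins (PySem.Int.floordiv bp s) 1 else bins

lemma stepA_length (s n : Int) (bins : List Int) (bp : Int) :
    (stepA s n bins bp).length = bins.length := by
  unfold stepA
  split_ifs with h
  · rw [PySem.List.length_pySetD]
  · rfl

-- A's fold preserves the length of the bin array.
lemma foldA_length (s n : Int) (l : List Int) (bins : List Int) :
    (l.foldl (stepA s n) bins).length = bins.length := by
  induction l generalizing bins with
  | nil => rfl
  | cons bp l ih => rw [List.foldl_cons, ih, stepA_length]

-- Element i of A's fold result: 1 if some breakpoint lands in bin i, else the starting value.
lemma foldA_getD (s n : Int) (l : List Int) (bins : List Int)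
    (hlen : (bins.length : Int) = n) (i : Nat) (hi : i < bins.length) :
    (l.foldl (stepA s n) bins).getD i 0
    = if (∃ bp ∈ l, PySem.Int.floordiv bp s = (i : Int)) then 1 else bins.getD i 0 := by
  induction l generalizing bins with
  | nil => simp
  | cons bp l ih =>
      rw [List.foldl_cons,
        ih (stepA s n bins bp) (by rw [stepA_length]; exact hlen) (by rw [stepA_length]; exact hi)]
      by_cases hg : 0 ≤ PySem.Int.floordiv bp s ∧ PySem.Int.floordiv bp s < n
      · have hset : stepA s n bins bp = bins.set (PySem.Int.floordiv bp s).toNat 1 := by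
          unfold stepA
          rw [if_pos hg, PySem.List.pySetD_of_nonneg _ _ hg.1]
        by_cases hrest : ∃ bp' ∈ l, PySem.Int.floordiv bp' s = (i : Int)
        · have hex : ∃ x ∈ bp :: l, PySem.Int.floordiv x s = (i : Int) := by
            obtain ⟨b, hb, he⟩ := hrest; exact ⟨b, List.mem_cons_of_mem _ hb, he⟩
          simp [hrest]
        · by_cases hcur : PySem.Int.floordiv bp s = (i : Int)
          · have hti : (PySem.Int.floordiv bp s).toNat = i := by omega
            have hex : ∃ x ∈ bp :: l, PySem.Int.floordiv x s = (i : Int) :=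
              ⟨bp, List.mem_cons_self, hcur⟩
            simp [hrest, hset, hcur, List.getD, hi]
          · have hti : (PySem.Int.floordiv bp s).toNat ≠ i := by omega
            have hex : ¬ ∃ x ∈ bp :: l, PySem.Int.floordiv x s = (i : Int) := by
              rintro ⟨x, hx, he⟩
              rcases List.mem_cons.mp hx with rfl | hx'
              · exact hcur he
              · exact hrest ⟨x, hx', he⟩
            simp [hrest, hset, hcur, List.getD, hti]
      · -- guard fails for bp: no write, and bp cannot land in bin i (0 ≤ i < n)
        have hid : stepA s n bins bp = bins := by unfold stepA; rw [if_neg hg]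
        have hcur : PySem.Int.floordiv bp s ≠ (i : Int) := by
          intro h
          apply hg
          refine ⟨by rw [h]; exact_mod_cast Int.natCast_nonneg i, ?_⟩
          rw [h, ← hlen]; exact_mod_cast hi
        rw [hid]
        by_cases hrest : ∃ bp' ∈ l, PySem.Int.floordiv bp' s = (i : Int)
        · have hex : ∃ x ∈ bp :: l, PySem.Int.floordiv x s = (i : Int) := by
            obtain ⟨b, hb, he⟩ := hrest; exact ⟨b, List.mem_cons_of_mem _ hb, he⟩
          simp [hrest, hcur]
        · have hex : ¬ ∃ x ∈ bp :: l, PySem.Int.floordiv x s = (i : Int) := by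
            rintro ⟨x, hx, he⟩
            rcases List.mem_cons.mp hx with rfl | hx'
            · exact hcur he
            · exact hrest ⟨x, hx', he⟩
          simp [hrest, hcur]

-- B's fold factors through the accumulated output prefix.
lemma foldB_factor (L : List Int) (acc : List Int) (p : Int) :
    L.foldl stepB (acc, p)
    = (acc ++ (L.foldl stepB ([], p)).1, (L.foldl stepB ([], p)).2) := by
  induction L generalizing acc p with
  | nil => simp
  | cons idx rest ih =>
      simp only [List.foldl_cons, stepB, List.nil_append]
      rw [ih (acc ++ List.replicate (idx - p).toNat 0 ++ [1]) (idx + 1),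
        ih (List.replicate (idx - p).toNat 0 ++ [1]) (idx + 1)]
      simp

-- B's run construction from a strictly increasing index list L bounded in [p, n)
-- equals the indicator map over the bin positions [p, n).
lemma foldB_runs (L : List Int) (p n : Int) (hsort : L.Pairwise (· < ·))
    (hmem : ∀ x ∈ L, p ≤ x ∧ x < n) :
    (L.foldl stepB ([], p)).1 ++ List.replicate (n - (L.foldl stepB ([], p)).2).toNat 0
    = (PySem.List.pyRange p n 1).map (fun i => if i ∈ L then 1 else 0) := by
  induction L generalizing p with
  | nil =>
      simp only [List.foldl_nil, List.nil_append, List.not_mem_nil, if_false]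
      rw [List.map_const']
      simp [PySem.List.length_pyRange_one]
  | cons idx rest ih =>
      obtain ⟨hp, hn⟩ := hmem idx (List.mem_cons_self)
      have hrest_gt : ∀ x ∈ rest, idx < x := (List.pairwise_cons.mp hsort).1
      rw [List.foldl_cons,
        show stepB (([] : List Int), p) idx
          = (List.replicate (idx - p).toNat 0 ++ [1], idx + 1) by simp [stepB],
        foldB_factor]
      have ihr := ih (idx + 1) (List.pairwise_cons.mp hsort).2
        (fun x hx => ⟨by have := hrest_gt x hx; omega, (hmem x (List.mem_cons_of_mem _ hx)).2⟩)
      rw [PySem.List.pyRange_one_append p idx n hp (le_of_lt hn),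
        PySem.List.pyRange_one_cons hn, List.map_append, List.map_cons]
      have hzeros : (PySem.List.pyRange p idx 1).map
          (fun i => if i ∈ idx :: rest then (1 : Int) else 0)
          = List.replicate (idx - p).toNat 0 := by
        have : ∀ i ∈ PySem.List.pyRange p idx 1, i ∉ idx :: rest := by
          intro i hi
          have hib := (PySem.List.mem_pyRange_one).mp hi
          intro hmem'
          rcases List.mem_cons.mp hmem' with rfl | h'
          · omega
          · have := hrest_gt i h'; omega
        calc (PySem.List.pyRange p idx 1).map (fun i => if i ∈ idx :: rest then (1 : Int) else 0)
            = (PySem.List.pyRange p idx 1).map (fun _ => (0 : Int)) := by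
              apply List.map_congr_left
              intro i hi; simp [this i hi]
          _ = List.replicate (idx - p).toNat 0 := by
              rw [List.map_const']; simp [PySem.List.length_pyRange_one]
      have htail : (PySem.List.pyRange (idx + 1) n 1).map
          (fun i => if i ∈ idx :: rest then (1 : Int) else 0)
          = (PySem.List.pyRange (idx + 1) n 1).map (fun i => if i ∈ rest then (1 : Int) else 0) := by
        apply List.map_congr_left
        intro i hi
        have hib := (PySem.List.mem_pyRange_one).mp hi
        have : i ≠ idx := by omega
        simp [this]
      rw [hzeros, htail, ← ihr]
      simp [List.mem_cons]
-- (the `simp [List.mem_cons]` closes the remaining list-rearrangement goal)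

-- Membership in B's sorted distinct index list.
lemma mem_idxs (breakpoints : List Int) (bs n i : Int) :
    i ∈ PySem.List.sorted (PySem.Set.ofList (breakpoints.filterMap (fun bp =>
        let q := PySem.Int.floordiv bp bs
        if 0 ≤ q ∧ q < n then some q else none))) (fun x => x) false
    ↔ ((∃ bp ∈ breakpoints, PySem.Int.floordiv bp bs = i) ∧ 0 ≤ i ∧ i < n) := by
  rw [PySem.List.mem_sorted, PySem.Set.mem_ofList, List.mem_filterMap]
  constructor
  · rintro ⟨bp, hbp, hq⟩
    simp only at hq
    split_ifs at hq with hg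
    cases hq; exact ⟨⟨bp, hbp, rfl⟩, hg⟩
  · rintro ⟨⟨bp, hbp, hq⟩, hg⟩
    refine ⟨bp, hbp, ?_⟩
    simp only [hq, if_pos hg]

-- ===== VERDICT (by name: the statement is the Claim_ definition above) =====
theorem breakpoints_to_bins_py_spec : Claim_equal_breakpoints_to_bins_py := by
  intro breakpoints text_length bin_size _ _
  unfold Spec_breakpoints_to_bins_py breakpoints_to_bins_py breakpoints_to_bins_py_alt
  set n : Int := max 1 (PySem.Int.floordiv text_length bin_size) with hn
  have hn1 : 1 ≤ n := le_max_left _ _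
  set L : List Int := PySem.List.sorted (PySem.Set.ofList (breakpoints.filterMap (fun bp =>
      let q := PySem.Int.floordiv bp bin_size
      if 0 ≤ q ∧ q < n then some q else none))) (fun x => x) false with hL
  show breakpoints.foldl (stepA bin_size n) (List.replicate n.toNat 0)
    = (L.foldl stepB ([], 0)).1 ++ List.replicate (n - (L.foldl stepB ([], 0)).2).toNat 0
  have hsort : L.Pairwise (· < ·) := by
    rw [hL]; exact PySem.List.sorted_ofList_pairwise_lt _
  have hmemL : ∀ i, i ∈ L ↔ ((∃ bp ∈ breakpoints, PySem.Int.floordiv bp bin_size = i) ∧ 0 ≤ i ∧ i < n) := by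
    intro i; rw [hL]; exact mem_idxs breakpoints bin_size n i
  rw [foldB_runs L 0 n hsort (fun x hx => by have := (hmemL x).mp hx; omega)]
  have hrepl : ((List.replicate n.toNat (0 : Int)).length : Int) = n := by
    simp [List.length_replicate]; omega
  have hlenA : (breakpoints.foldl (stepA bin_size n) (List.replicate n.toNat 0)).length
      = n.toNat := by rw [foldA_length]; simp
  apply List.ext_getElem
  · rw [hlenA, List.length_map, PySem.List.length_pyRange_one]; omega
  · intro i h1 h2
    have hiN : i < n.toNat := by rw [hlenA] at h1; exact h1
    have hgd := foldA_getD bin_size n breakpoints (List.replicate n.toNat 0) hrepl i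
      (by simpa using hiN)
    rw [List.getD_eq_getElem?_getD, List.getElem?_eq_getElem h1, Option.getD_some] at hgd
    rw [hgd, List.getElem_map]
    have hrange : (PySem.List.pyRange 0 n 1)[i]'(by simpa using h2) = (i : Int) := by
      rw [PySem.List.getElem_pyRange_one]; omega
    rw [hrange]
    by_cases hex : ∃ bp ∈ breakpoints, PySem.Int.floordiv bp bin_size = (i : Int)
    · have hin : (i : Int) ∈ L := (hmemL _).mpr ⟨hex, by positivity, by omega⟩
      simp [hex, hin]
    · have hnin : (i : Int) ∉ L := fun h => hex ((hmemL _).mp h).1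
      simp [hex, hiN, hnin]
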